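-- pv_equiv track=rewrite | github.com/igwall/math_decision | PROJET_PIFE_4/GML/src/degre.py | existsDegInOutInfOrEqual
-- ===== SOURCE A (Python) =====
-- def incomingDegree(student, marks):
--     degree = 0
--     columnStudent = []
--     for ligne in marks:
--         columnStudent.append(ligne[student])
--
--     for i in range(0, len(columnStudent) ):
--         if columnStudent[i] != '-1':
--             degree = degree + 1
--     return degree
--
-- def outgoingDegree(student, marks):
--     degree = 0
--
--     for i in range(0, len(marks) ):
--         if marks[student][i] != '-1':
--             degree = degree + 1
--     return degree
--
-- def existsDegInOutInfOrEqual(degree, marks):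
--     existStudentWithDegInfOrEqDegree = False
--     for student in range(len(marks)):
--         degInInfOrEq = outgoingDegree(student,marks) <= degree
--         degOutInfOrEq = incomingDegree(student,marks) <= degree
--         if (degInInfOrEq or degOutInfOrEq) :
--             existStudentWithDegInfOrEqDegree = True
--     return existStudentWithDegInfOrEqDegree
-- ===== SOURCE B (Python) =====
-- def existsDegInOutInfOrEqual(degree, marks):
--     n = len(marks)
--     outc = [0] * n
--     inc = [0] * n
--     for i in range(n):
--         row = marks[i]
--         for j in range(n):
--             if row[j] != '-1':
--                 outc[i] += 1
--                 inc[j] += 1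
--     return any(outc[s] <= degree or inc[s] <= degree for s in range(n))
-- ===== Notes on version B (the rewrite author's own statement) =====
-- stated objective: faster
-- what changed: Builds both in/out degree count tables in one pass over the matrix and then scans them, instead of recomputing each student's degrees with per-student helper calls (which rebuilt a column list per student).
import Mathlib
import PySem

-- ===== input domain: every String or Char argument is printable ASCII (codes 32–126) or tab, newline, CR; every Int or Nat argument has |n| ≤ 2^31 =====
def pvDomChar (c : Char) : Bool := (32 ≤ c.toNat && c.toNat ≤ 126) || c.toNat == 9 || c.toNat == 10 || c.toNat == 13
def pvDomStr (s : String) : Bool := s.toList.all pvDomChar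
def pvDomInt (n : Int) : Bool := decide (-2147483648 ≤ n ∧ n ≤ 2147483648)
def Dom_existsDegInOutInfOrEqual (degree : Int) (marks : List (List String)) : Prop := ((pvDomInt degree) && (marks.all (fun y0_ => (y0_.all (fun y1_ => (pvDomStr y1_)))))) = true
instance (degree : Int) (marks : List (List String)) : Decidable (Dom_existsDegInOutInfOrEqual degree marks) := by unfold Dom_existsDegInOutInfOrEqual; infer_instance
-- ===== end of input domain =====

-- B builds both in/out degree count tables in one pass over the matrix and then scans them,
-- instead of recomputing each student's degrees with per-student helper calls (objective: faster, constant factor).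

-- ===== PORT A =====
-- all indices in A are values of range(...), hence nonnegative; `getD` with an arbitrary
-- default transliterates the in-range access (Python raises out of range; Pre_ excludes that)
def incomingDegreeA (student : Nat) (marks : List (List String)) : Int :=
  let columnStudent : List String :=
    marks.foldl (fun acc ligne => acc ++ [ligne.getD student "-1"]) []
  (List.range columnStudent.length).foldl
    (fun degree i => if columnStudent.getD i "-1" ≠ "-1" then degree + 1 else degree) 0

def outgoingDegreeA (student : Nat) (marks : List (List String)) : Int :=
  (List.range marks.length).foldl
    (fun degree i => if (marks.getD student []).getD i "-1" ≠ "-1" then degree + 1 else degree) 0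

def existsDegInOutInfOrEqual (degree : Int) (marks : List (List String)) : Bool :=
  (List.range marks.length).foldl
    (fun existFlag student =>
      let degInInfOrEq := outgoingDegreeA student marks ≤ degree
      let degOutInfOrEq := incomingDegreeA student marks ≤ degree
      if degInInfOrEq ∨ degOutInfOrEq then true else existFlag)
    false

-- ===== PORT B =====
def existsDegInOutInfOrEqual_alt (degree : Int) (marks : List (List String)) : Bool :=
  let n := marks.length
  let counts : List Int × List Int :=
    (List.range n).foldl
      (fun acc i =>
        let row := marks.getD i []
        (List.range n).foldl
          (fun acc2 j =>
            if row.getD j "-1" ≠ "-1" then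
              (acc2.1.set i (acc2.1.getD i 0 + 1), acc2.2.set j (acc2.2.getD j 0 + 1))
            else acc2)
          acc)
      (List.replicate n 0, List.replicate n 0)
  (List.range n).any (fun s =>
    decide (counts.1.getD s 0 ≤ degree) || decide (counts.2.getD s 0 ≤ degree))

-- ===== PRECONDITION & SPEC =====
-- Pre_ excludes exactly the ragged matrices (some row shorter than len(marks)) on which the
-- Python A raises IndexError.
def Pre_existsDegInOutInfOrEqual (degree : Int) (marks : List (List String)) : Prop :=
  ∀ row ∈ marks, marks.length ≤ row.length
instance (degree : Int) (marks : List (List String)) : Decidable (Pre_existsDegInOutInfOrEqual degree marks) := by unfold Pre_existsDegInOutInfOrEqual; infer_instance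

def pvWitness_existsDegInOutInfOrEqual : Int × List (List String) :=
  (1, [["-1", "3"], ["2", "-1"]])

def Spec_existsDegInOutInfOrEqual (degree : Int) (marks : List (List String)) (out : Bool) : Prop := out = existsDegInOutInfOrEqual_alt degree marks
instance (degree : Int) (marks : List (List String)) (out : Bool) : Decidable (Spec_existsDegInOutInfOrEqual degree marks out) := by unfold Spec_existsDegInOutInfOrEqual; infer_instance

-- ===== CLAIM (what is proved, stated in full; the proofs are below) =====
def Claim_equal_existsDegInOutInfOrEqual : Prop := ∀ (degree : Int) (marks : List (List String)), Dom_existsDegInOutInfOrEqual degree marks → Pre_existsDegInOutInfOrEqual degree marks → Spec_existsDegInOutInfOrEqual degree marks (existsDegInOutInfOrEqual degree marks)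

-- ===== LEMMAS AND PROOFS =====

-- the flag fold of A is an `any`
theorem foldl_flag (c : Nat → Prop) [DecidablePred c] (l : List Nat) (b : Bool) :
    l.foldl (fun flag s => if c s then true else flag) b = (b || l.any fun s => decide (c s)) := by
  induction l generalizing b with
  | nil => simp
  | cons x xs ih =>
    simp only [List.foldl_cons, List.any_cons, ih]
    by_cases h : c x <;> simp [h]

-- the counting folds of A's helpers are countP
theorem foldl_count (P : Nat → Prop) [DecidablePred P] (l : List Nat) (b : Int) :
    l.foldl (fun d i => if P i then d + 1 else d) b = b + (l.countP fun i => decide (P i)) := by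
  induction l generalizing b with
  | nil => simp
  | cons x xs ih =>
    simp only [List.foldl_cons, List.countP_cons, ih]
    by_cases h : P x <;> simp [h] <;> push_cast <;> ring

theorem foldl_append_map (g : List String → String) (marks : List (List String)) (acc : List String) :
    marks.foldl (fun acc ligne => acc ++ [g ligne]) acc = acc ++ marks.map g := by
  induction marks generalizing acc with
  | nil => simp
  | cons x xs ih => simp [ih]

-- the matrix entry as both ports read it
def entryA (marks : List (List String)) (i j : Nat) : String :=
  (marks.getD i []).getD j "-1"

-- the two degree counts, as countP
def cntOut (marks : List (List String)) (s : Nat) : Nat :=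
  (List.range marks.length).countP fun j => decide (entryA marks s j ≠ "-1")
def cntIn (marks : List (List String)) (s : Nat) : Nat :=
  (List.range marks.length).countP fun i => decide (entryA marks i s ≠ "-1")

theorem outgoingDegreeA_eq (s : Nat) (marks : List (List String)) :
    outgoingDegreeA s marks = (cntOut marks s : Int) := by
  unfold outgoingDegreeA cntOut entryA
  rw [foldl_count (fun i => (marks.getD s []).getD i "-1" ≠ "-1")]
  simp

theorem incomingDegreeA_eq (s : Nat) (marks : List (List String)) :
    incomingDegreeA s marks = (cntIn marks s : Int) := by
  unfold incomingDegreeA cntIn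
  rw [foldl_append_map (fun ligne => ligne.getD s "-1") marks []]
  rw [foldl_count (fun i =>
    (([] : List String) ++ marks.map (fun ligne => ligne.getD s "-1")).getD i "-1" ≠ "-1")]
  simp only [List.nil_append, List.length_map, Int.zero_add, Int.natCast_inj]
  apply List.countP_congr
  intro i hi
  simp only [List.mem_range] at hi
  simp [entryA, List.getD_eq_getElem?_getD, List.getElem?_map, hi, List.getElem?_eq_getElem]

theorem getD_set (l : List Int) (i : Nat) (v : Int) (s : Nat) :
    (l.set i v).getD s 0 = if s = i ∧ i < l.length then v else l.getD s 0 := by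
  simp only [List.getD_eq_getElem?_getD, List.getElem?_set]
  split_ifs with h1 h2 h3 h4 <;> simp_all <;> omega

theorem countP_range_eq (n s : Nat) (P : Nat → Prop) [DecidablePred P] (hs : s < n) :
    ((List.range n).countP fun j => decide (j = s ∧ P j)) = if P s then 1 else 0 := by
  by_cases h : P s
  · rw [if_pos h]
    have : ((List.range n).countP fun j => decide (j = s ∧ P j)) = (List.range n).count s := by
      apply List.countP_congr
      intro j hj
      simp only [beq_iff_eq] at *
      constructor <;> intro hh <;> simp_all
    rw [this, List.count_range]
    simp [hs]
  · rw [if_neg h]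
    apply List.countP_eq_zero.2
    intro j hj
    simp only [decide_eq_true_eq]
    rintro ⟨rfl, hp⟩; exact h hp

-- B's inner fold (one row), characterized pointwise
theorem inner_spec (marks : List (List String)) (i : Nat) (J : List Nat) (o c : List Int)
    (hi : i < o.length) :
    (J.foldl
      (fun acc2 j =>
        if (marks.getD i []).getD j "-1" ≠ "-1" then
          (acc2.1.set i (acc2.1.getD i 0 + 1), acc2.2.set j (acc2.2.getD j 0 + 1))
        else acc2) (o, c)).1.length = o.length ∧
    (J.foldl
      (fun acc2 j =>
        if (marks.getD i []).getD j "-1" ≠ "-1" then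
          (acc2.1.set i (acc2.1.getD i 0 + 1), acc2.2.set j (acc2.2.getD j 0 + 1))
        else acc2) (o, c)).2.length = c.length ∧
    (∀ s, (J.foldl
      (fun acc2 j =>
        if (marks.getD i []).getD j "-1" ≠ "-1" then
          (acc2.1.set i (acc2.1.getD i 0 + 1), acc2.2.set j (acc2.2.getD j 0 + 1))
        else acc2) (o, c)).1.getD s 0 =
        o.getD s 0 + if s = i then ((J.countP fun j => decide (entryA marks i j ≠ "-1") : Nat) : Int) else 0) ∧
    (∀ s, (J.foldl
      (fun acc2 j =>
        if (marks.getD i []).getD j "-1" ≠ "-1" then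
          (acc2.1.set i (acc2.1.getD i 0 + 1), acc2.2.set j (acc2.2.getD j 0 + 1))
        else acc2) (o, c)).2.getD s 0 =
        c.getD s 0 + ((J.countP fun j => decide (j = s ∧ j < c.length ∧ entryA marks i j ≠ "-1") : Nat) : Int)) := by
  induction J generalizing o c with
  | nil => simp
  | cons j J ih =>
    by_cases hj : entryA marks i j ≠ "-1"
    · have hstep : (fun (acc2 : List Int × List Int) j =>
        if (marks.getD i []).getD j "-1" ≠ "-1" then
          (acc2.1.set i (acc2.1.getD i 0 + 1), acc2.2.set j (acc2.2.getD j 0 + 1))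
        else acc2) (o, c) j =
          (o.set i (o.getD i 0 + 1), c.set j (c.getD j 0 + 1)) := by
        simp only [entryA] at hj; beta_reduce; rw [if_pos hj]
      simp only [List.foldl_cons, hstep]
      obtain ⟨h1, h2, h3, h4⟩ := ih (o.set i (o.getD i 0 + 1)) (c.set j (c.getD j 0 + 1))
        (by simpa using hi)
      refine ⟨by simpa using h1, by simpa using h2, ?_, ?_⟩
      · intro s
        rw [h3 s, getD_set, List.countP_cons]
        by_cases hsi : s = i <;> simp [hsi, hi, hj] <;> push_cast <;> ring
      · intro s
        rw [h4 s, getD_set, List.countP_cons]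
        simp only [List.length_set]
        by_cases hsj : j = s
        · subst hsj
          by_cases hjl : j < c.length <;> simp [hjl, hj] <;> push_cast <;> ring
        · have : ¬ (s = j ∧ j < c.length) := fun hh => hsj hh.1.symm
          simp [hsj, Ne.symm hsj, hj]
    · have hstep : (fun (acc2 : List Int × List Int) j =>
        if (marks.getD i []).getD j "-1" ≠ "-1" then
          (acc2.1.set i (acc2.1.getD i 0 + 1), acc2.2.set j (acc2.2.getD j 0 + 1))
        else acc2) (o, c) j = (o, c) := by
        simp only [entryA] at hj; beta_reduce; rw [if_neg hj]
      simp only [List.foldl_cons, hstep]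
      obtain ⟨h1, h2, h3, h4⟩ := ih o c hi
      refine ⟨h1, h2, ?_, ?_⟩
      · intro s; rw [h3 s, List.countP_cons]; simp [hj]
      · intro s; rw [h4 s, List.countP_cons]; simp [hj]

-- B's outer fold, characterized pointwise
theorem outer_spec (marks : List (List String)) (L : List Nat) (o c : List Int)
    (ho : o.length = marks.length) (hc : c.length = marks.length)
    (hL : ∀ i ∈ L, i < marks.length) :
    (L.foldl
      (fun acc i =>
        (List.range marks.length).foldl
          (fun acc2 j =>
            if (marks.getD i []).getD j "-1" ≠ "-1" then
              (acc2.1.set i (acc2.1.getD i 0 + 1), acc2.2.set j (acc2.2.getD j 0 + 1))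
            else acc2) acc) (o, c)).1.length = o.length ∧
    (L.foldl
      (fun acc i =>
        (List.range marks.length).foldl
          (fun acc2 j =>
            if (marks.getD i []).getD j "-1" ≠ "-1" then
              (acc2.1.set i (acc2.1.getD i 0 + 1), acc2.2.set j (acc2.2.getD j 0 + 1))
            else acc2) acc) (o, c)).2.length = c.length ∧
    (∀ s, (L.foldl
      (fun acc i =>
        (List.range marks.length).foldl
          (fun acc2 j =>
            if (marks.getD i []).getD j "-1" ≠ "-1" then
              (acc2.1.set i (acc2.1.getD i 0 + 1), acc2.2.set j (acc2.2.getD j 0 + 1))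
            else acc2) acc) (o, c)).1.getD s 0 =
        o.getD s 0 + ((L.countP fun i => decide (i = s) : Nat) : Int) * (cntOut marks s : Int)) ∧
    (∀ s, s < marks.length → (L.foldl
      (fun acc i =>
        (List.range marks.length).foldl
          (fun acc2 j =>
            if (marks.getD i []).getD j "-1" ≠ "-1" then
              (acc2.1.set i (acc2.1.getD i 0 + 1), acc2.2.set j (acc2.2.getD j 0 + 1))
            else acc2) acc) (o, c)).2.getD s 0 =
        c.getD s 0 + ((L.countP fun i => decide (entryA marks i s ≠ "-1") : Nat) : Int)) := by
  induction L generalizing o c with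
  | nil => simp
  | cons i L ih =>
    have hi : i < o.length := ho ▸ hL i (List.mem_cons_self ..)
    obtain ⟨g1, g2, g3, g4⟩ := inner_spec marks i (List.range marks.length) o c hi
    simp only [List.foldl_cons]
    obtain ⟨h1, h2, h3, h4⟩ := ih _ _ (g1.trans ho) (g2.trans hc)
      (fun x hx => hL x (List.mem_cons_of_mem _ hx))
    refine ⟨h1.trans g1, h2.trans g2, ?_, ?_⟩
    · intro s
      rw [h3 s, g3 s, List.countP_cons]
      by_cases hsi : i = s
      · subst hsi
        have : cntOut marks i = (List.range marks.length).countP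
            fun j => decide (entryA marks i j ≠ "-1") := rfl
        simp only [this, decide_true, if_pos rfl, if_true]
        push_cast; ring
      · simp [hsi, Ne.symm hsi]
    · intro s hs
      rw [h4 s hs, g4 s, List.countP_cons]
      have hcnt : ((List.range marks.length).countP
          fun j => decide (j = s ∧ j < c.length ∧ entryA marks i j ≠ "-1")) =
          if entryA marks i s ≠ "-1" then 1 else 0 := by
        rw [countP_range_eq marks.length s (fun j => j < c.length ∧ entryA marks i j ≠ "-1") hs]
        by_cases hne : entryA marks i s ≠ "-1" <;> simp [hne, hc ▸ hs]
      rw [hcnt]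
      by_cases hne : entryA marks i s ≠ "-1" <;> simp [hne] <;> push_cast <;> ring

theorem any_congr_mem (l : List Nat) (f g : Nat → Bool) (h : ∀ x ∈ l, f x = g x) :
    l.any f = l.any g := by
  induction l with
  | nil => rfl
  | cons x xs ih => simp_all [List.any_cons]

theorem alt_eq_any (degree : Int) (marks : List (List String)) :
    existsDegInOutInfOrEqual_alt degree marks =
      (List.range marks.length).any fun s =>
        decide ((cntOut marks s : Int) ≤ degree) || decide ((cntIn marks s : Int) ≤ degree) := by
  unfold existsDegInOutInfOrEqual_alt
  obtain ⟨-, -, h3, h4⟩ := outer_spec marks (List.range marks.length)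
    (List.replicate marks.length 0) (List.replicate marks.length 0)
    (by simp) (by simp) (by simp)
  apply any_congr_mem
  intro s hs
  simp only [List.mem_range] at hs
  have hrep : (List.replicate marks.length (0 : Int)).getD s 0 = 0 := by
    simp [List.getD_eq_getElem?_getD, List.getElem?_replicate, hs]
  have hone : ((List.range marks.length).countP fun i => decide (i = s)) = 1 := by
    have := countP_range_eq marks.length s (fun _ => True) hs
    simpa using this
  rw [h3 s, h4 s hs, hrep, hone]
  simp [cntIn]

-- ===== VERDICT (by name: the statement is the Claim_ definition above) =====
theorem existsDegInOutInfOrEqual_spec : Claim_equal_existsDegInOutInfOrEqual := by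
  intro degree marks _ _
  unfold Spec_existsDegInOutInfOrEqual existsDegInOutInfOrEqual
  rw [foldl_flag (fun student =>
    outgoingDegreeA student marks ≤ degree ∨ incomingDegreeA student marks ≤ degree)]
  rw [alt_eq_any]
  simp only [Bool.false_or]
  apply any_congr_mem
  intro s hs
  rw [outgoingDegreeA_eq, incomingDegreeA_eq]
  by_cases h1 : (cntOut marks s : Int) ≤ degree <;>
    by_cases h2 : (cntIn marks s : Int) ≤ degree <;> simp [h1, h2]
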